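-- pv_equiv track=rewrite | github.com/azozello/swe | leetcode/2020/winning_sequence.py | create_winning_sequence
-- ===== SOURCE A (Python) =====
-- def create_winning_sequence(start: int, peak: int, num: int):
--     result = []
--     val = start
--     for i in range(num):
--         result.append(val)
--         if i < peak:
--             val += 1
--         else:
--             val -= 1
--     return result
-- ===== SOURCE B (Python) =====
-- def create_winning_sequence(start: int, peak: int, num: int):
--     return [start + 2 * max(0, min(i, peak)) - i for i in range(num)]
-- ===== Notes on version B (the rewrite author's own statement) =====
-- stated objective: alternative
-- what changed: Replaces the loop that threads a running value through appends with a closed-form per-index formula start + 2*max(0, min(i, peak)) - i computed independently for each i.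
import Mathlib
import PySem

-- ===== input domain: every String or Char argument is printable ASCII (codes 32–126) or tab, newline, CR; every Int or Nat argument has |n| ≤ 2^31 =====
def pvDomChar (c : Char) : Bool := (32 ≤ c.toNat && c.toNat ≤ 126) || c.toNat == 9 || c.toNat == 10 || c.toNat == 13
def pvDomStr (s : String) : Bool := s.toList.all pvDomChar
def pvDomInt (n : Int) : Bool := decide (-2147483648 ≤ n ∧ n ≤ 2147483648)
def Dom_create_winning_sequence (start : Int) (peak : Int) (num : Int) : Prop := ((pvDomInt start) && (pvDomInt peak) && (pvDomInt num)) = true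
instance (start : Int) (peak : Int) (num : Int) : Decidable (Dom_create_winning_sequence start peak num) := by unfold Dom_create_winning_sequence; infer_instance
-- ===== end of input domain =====

-- B replaces A's accumulating loop by a closed-form per-index formula (objective: alternative, same cost).

-- ===== PORT A =====
-- loop over range(num), threading (result, val)
def cwsLoop (peak : Int) : List Int → List Int → Int → List Int
  | [], result, _ => result
  | i :: rest, result, val =>
      cwsLoop peak rest (result ++ [val]) (if i < peak then val + 1 else val - 1)

def create_winning_sequence (start : Int) (peak : Int) (num : Int) : List Int :=
  cwsLoop peak (PySem.List.pyRange 0 num 1) [] start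

-- ===== PORT B =====
def create_winning_sequence_alt (start : Int) (peak : Int) (num : Int) : List Int :=
  (PySem.List.pyRange 0 num 1).map (fun i => start + 2 * max 0 (min i peak) - i)

-- ===== PRECONDITION & SPEC =====
def Spec_create_winning_sequence (start : Int) (peak : Int) (num : Int) (out : List Int) : Prop := out = create_winning_sequence_alt start peak num
instance (start : Int) (peak : Int) (num : Int) (out : List Int) : Decidable (Spec_create_winning_sequence start peak num out) := by unfold Spec_create_winning_sequence; infer_instance

-- ===== CLAIM (what is proved, stated in full; the proofs are below) =====
def Claim_equal_create_winning_sequence : Prop := ∀ (start : Int) (peak : Int) (num : Int), Dom_create_winning_sequence start peak num → Spec_create_winning_sequence start peak num (create_winning_sequence start peak num)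

-- ===== LEMMAS AND PROOFS =====

lemma cwsLoop_append (peak : Int) (l : List Int) :
    ∀ (result : List Int) (val : Int),
      cwsLoop peak l result val = result ++ cwsLoop peak l [] val := by
  induction l with
  | nil => intro result val; simp [cwsLoop]
  | cons i rest ih =>
      intro result val
      simp only [cwsLoop]
      rw [ih (result ++ [val])]
      rw [show ([] : List Int) ++ [val] = [val] from rfl, ih [val]]
      simp

lemma cwsLoop_main (peak start : Int) :
    ∀ (n : ℕ) (a : Int), 0 ≤ a →
      cwsLoop peak (PySem.List.pyRange a (a + n) 1) [] (start + 2 * max 0 (min a peak) - a)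
        = (PySem.List.pyRange a (a + n) 1).map (fun i => start + 2 * max 0 (min i peak) - i) := by
  intro n
  induction n with
  | zero =>
      intro a _
      simp [PySem.List.pyRange_one, cwsLoop]
  | succ n ih =>
      intro a ha
      have hab : a < a + (n + 1 : ℕ) := by push_cast; omega
      rw [PySem.List.pyRange_one_cons hab]
      simp only [cwsLoop, List.map_cons, List.nil_append]
      rw [cwsLoop_append]
      have hupd : (if a < peak then (start + 2 * max 0 (min a peak) - a) + 1
                   else (start + 2 * max 0 (min a peak) - a) - 1)
          = start + 2 * max 0 (min (a + 1) peak) - (a + 1) := by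
        split_ifs with h <;> omega
      have hb : a + ((n + 1 : ℕ) : Int) = (a + 1) + (n : ℕ) := by push_cast; ring
      rw [hupd, hb, ih (a + 1) (by omega)]
      simp

-- ===== VERDICT (by name: the statement is the Claim_ definition above) =====
theorem create_winning_sequence_spec : Claim_equal_create_winning_sequence := by
  intro start peak num _
  unfold Spec_create_winning_sequence create_winning_sequence create_winning_sequence_alt
  by_cases h : 0 ≤ num
  · have : num = (0 : Int) + (num.toNat : ℕ) := by omega
    rw [this]
    have := cwsLoop_main peak start num.toNat 0 le_rfl
    simpa using this
  · have he : PySem.List.pyRange 0 num 1 = [] := by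
      rw [PySem.List.pyRange_one]
      have h0 : (num - 0).toNat = 0 := by omega
      rw [h0]; simp
    rw [he]; simp [cwsLoop]
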